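-- pv_equiv track=rewrite | github.com/takuya178/python-algorithm | array.py | sortByMaxMin
-- ===== SOURCE A (Python) =====
-- def sortByMaxMin(arr: int):
--     sortList = []
--     while len(arr) > 0:
--         maxNumber = max(arr)
--         minNumber = min(arr)
--         if len(arr) == 1:
--             sortList.append(maxNumber)
--         else:
--             sortList.append(maxNumber)
--             sortList.append(minNumber)
--         arr.remove(maxNumber)
--         if len(arr) <= 1: break
--         arr.remove(minNumber)
--
--     return sortList
-- ===== SOURCE B (Python) =====
-- def sortByMaxMin(arr):
--     s = sorted(arr)
--     res = []
--     i, j = 0, len(s) - 1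
--     while i < j:
--         res.append(s[j])
--         res.append(s[i])
--         i += 1
--         j -= 1
--     if i == j:
--         res.append(s[i])
--     return res
-- ===== Notes on version B (the rewrite author's own statement) =====
-- stated objective: faster
-- what changed: B sorts the list once and builds the answer with two pointers walking in from both ends, instead of A's repeated max/min scans with element removal on each loop iteration (note: A empties its argument in place, B leaves it untouched; return values are identical).
import Mathlib
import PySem

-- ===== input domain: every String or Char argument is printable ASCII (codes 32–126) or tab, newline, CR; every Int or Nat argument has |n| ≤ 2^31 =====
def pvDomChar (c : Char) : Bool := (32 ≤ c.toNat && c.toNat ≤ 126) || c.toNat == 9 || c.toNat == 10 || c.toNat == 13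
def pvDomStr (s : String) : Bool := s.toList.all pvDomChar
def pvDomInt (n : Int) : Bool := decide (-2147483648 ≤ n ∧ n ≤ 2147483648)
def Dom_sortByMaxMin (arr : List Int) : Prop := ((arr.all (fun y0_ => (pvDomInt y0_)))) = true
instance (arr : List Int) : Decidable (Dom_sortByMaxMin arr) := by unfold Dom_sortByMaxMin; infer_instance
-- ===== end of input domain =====

-- B sorts once and interleaves from both ends (two pointers) instead of A's repeated max/min scans
-- with removals; equivalence is about the return value only — A empties its argument in place, B does not.

-- ===== PORT A =====
-- A's while-loop: rescan for max and min, append, remove them; fuel = arr.length + 1 never runs out.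
def sortByMaxMinLoop : Nat → List Int → List Int → List Int
  | 0, _, sortList => sortList
  | _ + 1, [], sortList => sortList
  | fuel + 1, x :: t, sortList =>
    let arr := x :: t
    let maxNumber := (PySem.List.max? arr (fun y => y)).getD 0
    let minNumber := (PySem.List.min? arr (fun y => y)).getD 0
    let sortList' := if arr.length == 1 then sortList ++ [maxNumber]
                     else sortList ++ [maxNumber, minNumber]
    let arr' := (PySem.List.remove? arr maxNumber).getD arr
    if arr'.length ≤ 1 then sortList'
    else
      let arr'' := (PySem.List.remove? arr' minNumber).getD arr'
      sortByMaxMinLoop fuel arr'' sortList'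

def sortByMaxMin (arr : List Int) : List Int := sortByMaxMinLoop (arr.length + 1) arr []

-- ===== PORT B =====
-- B's while-loop: i from the left, j from the right on the sorted list; fuel = s.length + 1 never runs out.
def sortByMaxMinAltLoop : Nat → List Int → Int → Int → List Int → List Int
  | 0, _, _, _, res => res
  | fuel + 1, s, i, j, res =>
    if i < j then
      sortByMaxMinAltLoop fuel s (i + 1) (j - 1)
        (res ++ [PySem.List.pyGetD s j 0, PySem.List.pyGetD s i 0])
    else if i == j then res ++ [PySem.List.pyGetD s i 0]
    else res

def sortByMaxMin_alt (arr : List Int) : List Int :=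
  let s := PySem.List.sorted arr (fun y => y) false
  sortByMaxMinAltLoop (s.length + 1) s 0 ((s.length : Int) - 1) []

-- ===== PRECONDITION & SPEC =====
def Spec_sortByMaxMin (arr : List Int) (out : List Int) : Prop := out = sortByMaxMin_alt arr
instance (arr : List Int) (out : List Int) : Decidable (Spec_sortByMaxMin arr out) := by unfold Spec_sortByMaxMin; infer_instance

-- ===== CLAIM (what is proved, stated in full; the proofs are below) =====
def Claim_equal_sortByMaxMin : Prop := ∀ (arr : List Int), Dom_sortByMaxMin arr → Spec_sortByMaxMin arr (sortByMaxMin arr)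

-- ===== LEMMAS AND PROOFS =====

-- the common value of both loops: last, first, last, first, … of a (sorted) list
def itl : List Int → List Int
  | [] => []
  | [x] => [x]
  | x :: y :: t => (y :: t).getLast (by simp) :: x :: itl ((y :: t).dropLast)
termination_by l => l.length
decreasing_by simp

-- in a ≤-pairwise list every element is ≤ the last one
theorem le_getLast_of_pairwise {S : List Int} (h : S.Pairwise (· ≤ ·)) (hne : S ≠ []) :
    ∀ y ∈ S, y ≤ S.getLast hne := by
  induction S with
  | nil => simp at hne
  | cons a t ih =>
    intro y hy
    cases t with
    | nil => simp_all
    | cons b u =>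
      rw [List.getLast_cons (by simp)]
      rcases List.mem_cons.1 hy with rfl | hy'
      · exact le_trans (List.rel_of_pairwise_cons h (List.getLast_mem _))
          (le_refl _)
      · exact ih (List.pairwise_cons.1 h).2 (by simp) y hy'

theorem getLast_sorted_eq_max (arr : List Int) (mx : Int)
    (h : PySem.List.max? arr (fun y => y) = some mx)
    (hne : PySem.List.sorted arr (fun y => y) false ≠ []) :
    (PySem.List.sorted arr (fun y => y) false).getLast hne = mx := by
  have hmem : mx ∈ arr := PySem.List.max?_mem h
  have hmax := PySem.List.max?_isMax h
  have hpw := PySem.List.sorted_pairwise arr (fun y => y)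
  apply le_antisymm
  · exact hmax _ ((PySem.List.mem_sorted arr _ false _).1 (List.getLast_mem hne))
  · exact le_getLast_of_pairwise hpw hne mx ((PySem.List.mem_sorted arr _ false mx).2 hmem)

theorem head_sorted_eq_min (arr : List Int) (mn m : Int) (t : List Int)
    (h : PySem.List.min? arr (fun y => y) = some mn)
    (hS : PySem.List.sorted arr (fun y => y) false = m :: t) : m = mn := by
  have hmem : mn ∈ arr := PySem.List.min?_mem h
  have hmin := PySem.List.min?_isMin h
  apply le_antisymm
  · exact PySem.List.key_head_sorted_le arr (fun y => y) hS mn hmem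
  · exact hmin m (by
      have : m ∈ PySem.List.sorted arr (fun y => y) false := by simp [hS]
      exact (PySem.List.mem_sorted arr _ false m).1 this)

-- erasing (one occurrence of) the maximum value sorts to dropLast of the sorted list
theorem sorted_erase_max (arr : List Int) (mx : Int) (hmem : mx ∈ arr)
    (hmax : ∀ y ∈ arr, y ≤ mx) :
    PySem.List.sorted (arr.erase mx) (fun y => y) false =
      (PySem.List.sorted arr (fun y => y) false).dropLast := by
  set S := PySem.List.sorted arr (fun y => y) false with hSdef
  have hperm : S.Perm arr := PySem.List.sorted_perm arr _ false
  have hpw : S.Pairwise (· ≤ ·) := PySem.List.sorted_pairwise arr (fun y => y)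
  have hne : S ≠ [] := by
    rw [hSdef, Ne, PySem.List.sorted_eq_nil_iff]; rintro rfl; simp at hmem
  have hlast : S.getLast hne = mx := by
    apply le_antisymm
    · exact hmax _ (hperm.mem_iff.1 (List.getLast_mem hne))
    · exact le_getLast_of_pairwise hpw hne mx (hperm.mem_iff.2 hmem)
  have hsplit : S = S.dropLast ++ [mx] := by
    conv_lhs => rw [← List.dropLast_append_getLast hne]
    rw [hlast]
  have hp : S.Perm (mx :: S.dropLast) := by
    conv_lhs => rw [hsplit]
    exact List.perm_append_singleton _ _
  have h1 : (S.erase mx).Perm S.dropLast := by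
    have h2 := hp.erase mx
    rwa [List.erase_cons_head] at h2
  apply PySem.List.sorted_id_eq_of_perm_of_pairwise
  · exact h1.symm.trans (hperm.erase mx)
  · exact hpw.sublist (List.dropLast_sublist S)

-- erasing (one occurrence of) the minimum value sorts to tail of the sorted list
theorem sorted_erase_min (arr : List Int) (mn : Int) (hmem : mn ∈ arr)
    (hmin : ∀ y ∈ arr, mn ≤ y) :
    PySem.List.sorted (arr.erase mn) (fun y => y) false =
      (PySem.List.sorted arr (fun y => y) false).tail := by
  set S := PySem.List.sorted arr (fun y => y) false with hSdef
  have hperm : S.Perm arr := PySem.List.sorted_perm arr _ false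
  have hpw : S.Pairwise (· ≤ ·) := PySem.List.sorted_pairwise arr (fun y => y)
  have hne : S ≠ [] := by
    rw [hSdef, Ne, PySem.List.sorted_eq_nil_iff]; rintro rfl; simp at hmem
  obtain ⟨m, t, hS⟩ := List.exists_cons_of_ne_nil hne
  have hm : m = mn := by
    apply le_antisymm
    · exact PySem.List.key_head_sorted_le arr (fun y => y) (hSdef ▸ hS) mn hmem
    · exact hmin m (hperm.mem_iff.1 (by simp [hS]))
  have h1 : ((m :: t).erase mn).Perm (arr.erase mn) := by
    rw [← hS]; exact hperm.erase mn
  apply PySem.List.sorted_id_eq_of_perm_of_pairwise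
  · rw [hS]; simp only [List.tail_cons]
    have h2 : (m :: t).erase mn = t := by rw [← hm, List.erase_cons_head]
    rwa [h2] at h1
  · rw [hS]; exact (List.pairwise_cons.1 (hS ▸ hpw)).2

theorem sorted_nil_int : PySem.List.sorted ([] : List Int) (fun y => y) false = [] :=
  (PySem.List.sorted_eq_nil_iff [] _ false).2 rfl

theorem loopA_eq : ∀ (fuel : Nat) (arr acc : List Int), arr.length ≤ fuel →
    sortByMaxMinLoop fuel arr acc = acc ++ itl (PySem.List.sorted arr (fun y => y) false) := by
  intro fuel
  induction fuel with
  | zero =>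
    intro arr acc h
    have harr : arr = [] := by
      cases arr with
      | nil => rfl
      | cons x t => simp at h
    subst harr
    rw [sorted_nil_int, itl.eq_1, List.append_nil]
    rfl
  | succ fuel ih =>
    intro arr acc h
    match arr with
    | [] =>
      rw [sorted_nil_int, itl.eq_1, List.append_nil]
      rfl
    | x :: t =>
      have hmaxeq := PySem.List.max?_id_cons x t
      have hmineq := PySem.List.min?_id_cons x t
      set mx := t.foldl max x with hmxdef
      set mn := t.foldl min x with hmndef
      have hmxmem : mx ∈ x :: t := PySem.List.max?_mem hmaxeq
      have hmxmax : ∀ y ∈ x :: t, y ≤ mx := by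
        have h0 := PySem.List.max?_isMax hmaxeq; simpa using h0
      have hmnmem : mn ∈ x :: t := PySem.List.min?_mem hmineq
      have hmnmin : ∀ y ∈ x :: t, mn ≤ y := by
        have h0 := PySem.List.min?_isMin hmineq; simpa using h0
      have hrm1 := PySem.List.remove?_eq_some_erase (x :: t) mx hmxmem
      cases t with
      | nil =>
        have hx : mx = x := by simp [hmxdef]
        have h4 : PySem.List.sorted [x] (fun y => y) false = [x] :=
          PySem.List.sorted_eq_self_of_pairwise _ _ (by simp)
        have h3 : PySem.List.remove? [x] mx = some [] := by
          rw [hrm1, hx, List.erase_cons_head]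
        rw [h4, itl.eq_2]
        simp only [sortByMaxMinLoop, hmaxeq, hmineq, h3, Option.getD_some]
        simp [hx]
      | cons y u =>
        set S := PySem.List.sorted (x :: y :: u) (fun y => y) false with hSdef
        have hSp : S.Perm (x :: y :: u) := PySem.List.sorted_perm (x :: y :: u) _ false
        have hSlen : S.length = u.length + 2 := by
          rw [hSp.length_eq]; simp
        obtain ⟨a, T, hS1⟩ := List.exists_cons_of_ne_nil
          (show S ≠ [] by intro h0; rw [h0] at hSlen; simp at hSlen)
        obtain ⟨b, t', hS2⟩ := List.exists_cons_of_ne_nil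
          (show T ≠ [] by
            intro h0; rw [h0] at hS1; rw [hS1] at hSlen; simp at hSlen)
        have hS : S = a :: b :: t' := by rw [hS1, hS2]
        have hSne : S ≠ [] := by rw [hS]; simp
        have ha : a = mn := head_sorted_eq_min (x :: y :: u) mn a (b :: t') hmineq (hSdef ▸ hS)
        have hlast : S.getLast hSne = mx :=
          getLast_sorted_eq_max (x :: y :: u) mx hmaxeq hSne
        have hgen : ∀ (L : List Int) (hL : L ≠ []) (_ : L = a :: b :: t'),
            L.getLast hL = (b :: t').getLast (by simp) := by
          intro L hL hEq
          subst hEq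
          exact List.getLast_cons (by simp)
        have hlast2 : (b :: t').getLast (by simp) = mx := by
          rw [← hgen S hSne hS]
          exact hlast
        have hlen1 : ((x :: y :: u).erase mx).length = u.length + 1 := by
          rw [List.length_erase_of_mem hmxmem]; simp
        have hcond : (((x :: y :: u).length == 1) : Bool) = false := by simp
        -- one step of the loop
        simp only [sortByMaxMinLoop, hmaxeq, hmineq, hrm1, Option.getD_some, hcond,
          Bool.false_eq_true, if_false]
        rcases eq_or_ne u [] with hu | hu
        · -- two-element list: the break after removing the max
          subst hu
          have ht' : t' = [] := by
            have := hSlen; rw [hS] at this; simp at this; omega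
          rw [if_pos (by rw [hlen1]; simp)]
          have hbmx : b = mx := by
            rw [← hlast2]; simp [ht']
          rw [hS, ht', itl.eq_3]
          have e1 : ([b] : List Int).dropLast = [] := rfl
          have e2 : ([b] : List Int).getLast (by simp) = b := rfl
          rw [e1, e2, itl.eq_1, ha, hbmx]
        · -- at least three elements: remove max and min, recurse
          have hlen2 : ¬ ((x :: y :: u).erase mx).length ≤ 1 := by
            rw [hlen1]
            have := List.length_pos_of_ne_nil hu
            omega
          rw [if_neg hlen2]
          have hsort1 : PySem.List.sorted ((x :: y :: u).erase mx) (fun y => y) false = S.dropLast :=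
            sorted_erase_max (x :: y :: u) mx hmxmem hmxmax
          have hmem' : mn ∈ (x :: y :: u).erase mx := by
            have : mn ∈ PySem.List.sorted ((x :: y :: u).erase mx) (fun y => y) false := by
              rw [hsort1, hS, List.dropLast_cons₂]
              rw [ha]; simp
            exact (PySem.List.mem_sorted _ _ _ _).1 this
          have hmin' : ∀ z ∈ (x :: y :: u).erase mx, mn ≤ z := fun z hz =>
            hmnmin z (List.mem_of_mem_erase hz)
          have hrm2 := PySem.List.remove?_eq_some_erase ((x :: y :: u).erase mx) mn hmem'
          rw [hrm2, Option.getD_some]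
          have hlen3 : (((x :: y :: u).erase mx).erase mn).length ≤ fuel := by
            rw [List.length_erase_of_mem hmem', hlen1]
            simp only [List.length_cons] at h
            omega
          rw [ih _ _ hlen3]
          have hsort2 : PySem.List.sorted (((x :: y :: u).erase mx).erase mn) (fun y => y) false =
              S.dropLast.tail :=
            (sorted_erase_min ((x :: y :: u).erase mx) mn hmem' hmin').trans (by rw [hsort1])
          rw [hsort2, hS, itl.eq_3, List.dropLast_cons₂, List.tail_cons, hlast2, ha]
          simp

-- one two-pointer step peels the last and first element of the remaining segment
theorem itl_take_step (s : List Int) (i j : Nat) (hij : i < j) (hj : j < s.length) :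
    itl ((s.drop i).take (j + 1 - i)) =
      s[j] :: s[i] :: itl ((s.drop (i + 1)).take (j - (i + 1))) := by
  have hi : i < s.length := lt_trans hij hj
  have hk : j + 1 - i = (j - i - 1) + 1 + 1 := by omega
  rw [List.drop_eq_getElem_cons hi, hk, List.take_succ_cons]
  have hMlen : ((s.drop (i + 1)).take (j - i - 1 + 1)).length = j - i - 1 + 1 := by
    simp [List.length_take, List.length_drop]; omega
  obtain ⟨b, u, hM⟩ := List.exists_cons_of_ne_nil
    (show (s.drop (i + 1)).take (j - i - 1 + 1) ≠ [] by
      intro h; rw [h] at hMlen; simp at hMlen)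
  rw [hM, itl.eq_3]
  have hlu : (b :: u).length = j - i - 1 + 1 := by rw [← hM]; exact hMlen
  congr 1
  · rw [List.getLast_eq_getElem, List.getElem_of_eq hM.symm,
      List.getElem_take, List.getElem_drop]
    congr 1; omega
  · congr 1
    rw [← hM, List.dropLast_eq_take, hMlen, List.take_take]
    have hmin : min (j - i - 1 + 1 - 1) (j - i - 1 + 1) = j - (i + 1) := by omega
    rw [hmin]

theorem loopB_eq : ∀ (fuel : Nat) (s : List Int) (i j : Nat) (res : List Int),
    i ≤ j + 1 → (j < s.length ∨ i = j + 1) → j + 1 - i ≤ fuel →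
    sortByMaxMinAltLoop fuel s (i : Int) (j : Int) res =
      res ++ itl ((s.drop i).take (j + 1 - i)) := by
  intro fuel
  induction fuel with
  | zero =>
    intro s i j res h1 h2 h3
    have hE : j + 1 - i = 0 := by omega
    rw [hE]
    simp [sortByMaxMinAltLoop, itl.eq_1]
  | succ fuel ih =>
    intro s i j res h1 h2 h3
    simp only [sortByMaxMinAltLoop]
    by_cases hij : i < j
    · have hj : j < s.length := by
        cases h2 with
        | inl h => exact h
        | inr h => omega
      have hi : i < s.length := lt_trans hij hj
      rw [if_pos (by exact_mod_cast hij)]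
      have e1 : (i : Int) + 1 = ((i + 1 : Nat) : Int) := by push_cast; ring
      have e2 : (j : Int) - 1 = ((j - 1 : Nat) : Int) := by
        have : 1 ≤ j := by omega
        push_cast [this]; ring
      rw [e1, e2, ih s (i + 1) (j - 1) _ (by omega) (by left; omega) (by omega)]
      have hgj : PySem.List.pyGetD s (j : Int) 0 = s[j] := by
        rw [PySem.List.pyGetD_natCast, List.getD_eq_getElem s 0 hj]
      have hgi : PySem.List.pyGetD s (i : Int) 0 = s[i] := by
        rw [PySem.List.pyGetD_natCast, List.getD_eq_getElem s 0 hi]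
      rw [hgj, hgi, itl_take_step s i j hij hj,
        show j - 1 + 1 - (i + 1) = j - (i + 1) by omega]
      simp
    · by_cases hij2 : i = j
      · subst hij2
        have hj : i < s.length := by
          cases h2 with
          | inl h => exact h
          | inr h => omega
        rw [if_neg (by exact_mod_cast hij), if_pos (by simp)]
        have hE : i + 1 - i = 1 := by omega
        rw [hE, List.drop_eq_getElem_cons hj, List.take_succ_cons, List.take_zero,
          itl.eq_2]
        rw [PySem.List.pyGetD_natCast, List.getD_eq_getElem s 0 hj]
      · have hE : i = j + 1 := by omega
        rw [if_neg (by exact_mod_cast hij), if_neg (by simp; omega)]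
        rw [show j + 1 - i = 0 by omega]
        simp [itl.eq_1]

-- ===== VERDICT (by name: the statement is the Claim_ definition above) =====
theorem sortByMaxMin_spec : Claim_equal_sortByMaxMin := by
  intro arr _
  unfold Spec_sortByMaxMin sortByMaxMin sortByMaxMin_alt
  rw [loopA_eq (arr.length + 1) arr [] (by omega)]
  set S := PySem.List.sorted arr (fun y => y) false with hSdef
  rcases eq_or_ne S [] with hS | hS
  · rw [hS]; rw [itl.eq_1]
    simp [sortByMaxMinAltLoop]
  · have hlen : 0 < S.length := List.length_pos_of_ne_nil hS
    show [] ++ itl S = sortByMaxMinAltLoop (S.length + 1) S 0 ((S.length : Int) - 1) []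
    have hc : ((S.length : Int) - 1) = ((S.length - 1 : Nat) : Int) := by
      push_cast [hlen]; omega
    rw [hc, show (0 : Int) = ((0 : Nat) : Int) by norm_num,
      loopB_eq (S.length + 1) S 0 (S.length - 1) [] (by omega) (by left; omega) (by omega)]
    simp only [List.drop_zero, List.nil_append]
    rw [show S.length - 1 + 1 - 0 = S.length by omega, List.take_length]
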